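-- pv_equiv track=rewrite | github.com/sourabhjagtap95/AwesomePythonScripts | lovecal.py | shortn
-- ===== SOURCE A (Python) =====
-- def shortn(n):
--     i=0
--     i=0
--     j=len(n)-1
--     n1=[]
--     while i<=j :
--         per = n[i]+n[j]
--         if i==j:
--             per = n[i]
--         n1.append(per)
--         i+=1
--         j-=1
--     return n1
-- ===== SOURCE B (Python) =====
-- def shortn(n):
--     h = len(n) // 2
--     first = n[:h]
--     second = n[len(n) - h:][::-1]
--     res = [a + b for a, b in zip(first, second)]
--     if len(n) % 2:
--         res.append(n[h])
--     return res
-- ===== Notes on version B (the rewrite author's own statement) =====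
-- stated objective: alternative
-- what changed: Replaces A's two-pointer inward while-loop with mutable indices by a split/reverse/zip over the two half-slices plus the lone middle element for odd lengths.
import Mathlib
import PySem

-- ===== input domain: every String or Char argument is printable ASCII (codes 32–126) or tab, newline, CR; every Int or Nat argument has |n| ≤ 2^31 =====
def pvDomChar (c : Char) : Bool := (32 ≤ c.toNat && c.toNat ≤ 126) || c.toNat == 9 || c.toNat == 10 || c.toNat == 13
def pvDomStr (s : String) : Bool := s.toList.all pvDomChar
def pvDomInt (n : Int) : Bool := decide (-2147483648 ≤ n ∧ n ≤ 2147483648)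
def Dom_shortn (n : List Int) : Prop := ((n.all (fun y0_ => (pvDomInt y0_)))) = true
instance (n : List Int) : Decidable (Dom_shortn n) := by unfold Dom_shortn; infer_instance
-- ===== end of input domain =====

-- B replaces A's two-pointer inward while-loop by a split/reverse/zip over the two half-slices
-- (plus the lone middle element when the length is odd): a different decomposition, same cost.


-- ===== PORT A =====
-- the while i<=j loop; n1.append(per) is acc ++ [per]; n[i]/n[j] are always in range here,
-- so pyGetD with default 0 is exact
def shortnLoop (n : List Int) (i j : Int) (n1 : List Int) : List Int :=
  if i ≤ j then
    let per := PySem.List.pyGetD n i 0 + PySem.List.pyGetD n j 0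
    let per := if i == j then PySem.List.pyGetD n i 0 else per
    shortnLoop n (i + 1) (j - 1) (n1 ++ [per])
  else n1
termination_by (j + 1 - i).toNat
decreasing_by omega

def shortn (n : List Int) : List Int :=
  shortnLoop n 0 (PySem.List.len n - 1) []

-- ===== PORT B =====
-- h = len(n)//2; first = n[:h]; second = n[len(n)-h:][::-1]  ([::-1] is reverse:
-- PySem.List.slice?_none_none_neg_one); res = [a+b for a,b in zip(first, second)];
-- if len(n) % 2: res.append(n[h])
def shortn_alt (n : List Int) : List Int :=
  let h : Int := PySem.Int.floordiv (PySem.List.len n) 2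
  let first := PySem.List.slice n (some 0) (some h)
  let second := (PySem.List.slice n (some (PySem.List.len n - h)) none).reverse
  let res := (first.zip second).map (fun p => p.1 + p.2)
  if PySem.Int.mod (PySem.List.len n) 2 ≠ 0 then res ++ [PySem.List.pyGetD n h 0] else res

-- ===== PRECONDITION & SPEC =====
def Spec_shortn (n : List Int) (out : List Int) : Prop := out = shortn_alt n
instance (n : List Int) (out : List Int) : Decidable (Spec_shortn n out) := by unfold Spec_shortn; infer_instance

-- ===== CLAIM (what is proved, stated in full; the proofs are below) =====
def Claim_equal_shortn : Prop := ∀ (n : List Int), Dom_shortn n → Spec_shortn n (shortn n)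

-- ===== LEMMAS AND PROOFS =====

-- B's computation restated with Nat arithmetic (same values; eases the induction)
def altN (l : List Int) : List Int :=
  let h := l.length / 2
  let res := ((l.take h).zip ((l.drop (l.length - h)).reverse)).map (fun p => p.1 + p.2)
  if l.length % 2 = 1 then res ++ [l.getD h 0] else res

theorem alt_eq_altN (n : List Int) : shortn_alt n = altN n := by
  have hdiv : PySem.Int.floordiv (PySem.List.len n) 2 = ((n.length / 2 : Nat) : Int) := by
    unfold PySem.Int.floordiv
    simp only [PySem.List.len_eq]
    rw [Int.fdiv_eq_ediv]
    omega
  have hmod : PySem.Int.mod (PySem.List.len n) 2 = ((n.length % 2 : Nat) : Int) := by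
    unfold PySem.Int.mod
    simp only [PySem.List.len_eq]
    rw [Int.fmod_eq_emod]
    omega
  have hsub : PySem.List.len n - ((n.length / 2 : Nat) : Int)
      = ((n.length - n.length / 2 : Nat) : Int) := by
    simp only [PySem.List.len_eq]
    omega
  unfold shortn_alt altN
  dsimp only
  rw [hdiv, hmod, hsub, PySem.List.slice_zero_start, PySem.List.slice_to_natCast,
    PySem.List.slice_from_natCast]
  simp only [PySem.List.pyGetD_natCast]
  rcases Nat.mod_two_eq_zero_or_one n.length with h | h <;> simp [h]

theorem altN_single (x : Int) : altN [x] = [x] := by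
  simp [altN]

theorem altN_step (x y : Int) (m : List Int) :
    altN (x :: (m ++ [y])) = (x + y) :: altN m := by
  have hle : m.length / 2 ≤ m.length := Nat.div_le_self _ _
  have e0 : (x :: (m ++ [y])).length = m.length + 2 := by simp
  have e1 : (x :: (m ++ [y])).take ((m.length + 2) / 2) = x :: m.take (m.length / 2) := by
    rw [show (m.length + 2) / 2 = m.length / 2 + 1 by omega, List.take_succ_cons,
      List.take_append_of_le_length hle]
  have e2 : (x :: (m ++ [y])).drop (m.length + 2 - (m.length + 2) / 2)
      = (m.drop (m.length - m.length / 2)) ++ [y] := by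
    rw [show m.length + 2 - (m.length + 2) / 2 = (m.length - m.length / 2) + 1 by omega,
      List.drop_succ_cons, List.drop_append_of_le_length (Nat.sub_le _ _)]
  have hmod : (m.length + 2) % 2 = m.length % 2 := by omega
  unfold altN
  dsimp only
  rw [e0, e1, e2, hmod, List.reverse_append, List.reverse_singleton, List.singleton_append,
    List.zip_cons_cons, List.map_cons]
  rcases Nat.mod_two_eq_zero_or_one m.length with h | h
  · simp [h]
  · have hlt : m.length / 2 < m.length := by omega
    rw [show (m.length + 2) / 2 = m.length / 2 + 1 by omega]
    simp [h, List.getElem?_append_left hlt]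

-- the loop invariant: the remaining segment n[i..j] is paired up exactly as altN does
theorem loop_inv (n : List Int) (k : Nat) :
    ∀ (i j : Int) (acc : List Int), 0 ≤ i → j + 1 - i = (k : Int) → j < (n.length : Int) →
      shortnLoop n i j acc = acc ++ altN ((n.drop i.toNat).take k) := by
  induction k using Nat.strong_induction_on with
  | _ k ih =>
    intro i j acc hi hk hj
    match k, hk with
    | 0, hk =>
      rw [shortnLoop, if_neg (by omega)]
      simp [altN]
    | (k' + 1), hk =>
      have hij : i ≤ j := by omega
      have hiN : i.toNat < n.length := by omega
      have hjN : j.toNat < n.length := by omega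
      have hgi : PySem.List.pyGetD n i 0 = n[i.toNat] :=
        PySem.List.pyGetD_eq_getElem n 0 hi (by omega)
      have hgj : PySem.List.pyGetD n j 0 = n[j.toNat] :=
        PySem.List.pyGetD_eq_getElem n 0 (by omega) (by omega)
      have hdrop : n.drop i.toNat = n[i.toNat] :: n.drop (i.toNat + 1) :=
        List.drop_eq_getElem_cons hiN
      match k' with
      | 0 =>
        -- i = j : the lone middle element; the next call returns acc immediately
        have hieq : i = j := by omega
        subst hieq
        rw [shortnLoop, if_pos hij]
        dsimp only
        rw [shortnLoop, if_neg (by omega : ¬ (i + 1 ≤ i - 1))]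
        simp only [beq_self_eq_true, if_true, hgi, hdrop, List.take_succ_cons, List.take_zero]
        rw [altN_single]
      | (k'' + 1) =>
        -- i < j : head-plus-last pair, then recurse on the inner segment
        have hij' : i < j := by omega
        rw [shortnLoop, if_pos hij]
        dsimp only
        simp only [beq_iff_eq, if_neg (by omega : ¬ i = j), hgi, hgj]
        rw [ih k'' (by omega) (i + 1) (j - 1) _ (by omega) (by omega) (by omega)]
        have hlen2 : k'' < (n.drop (i.toNat + 1)).length := by
          rw [List.length_drop]; omega
        have hseg : (n.drop i.toNat).take (k'' + 1 + 1)
            = n[i.toNat] :: (((n.drop (i.toNat + 1)).take k'') ++ [n[j.toNat]]) := by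
          have hidx : (n.drop (i.toNat + 1))[k''] = n[j.toNat] := by
            rw [List.getElem_drop]
            simp only [show i.toNat + 1 + k'' = j.toNat from by omega]
          rw [hdrop, List.take_succ_cons, List.take_add_one,
            List.getElem?_eq_getElem hlen2, hidx]
          simp
        have hi1 : (i + 1).toNat = i.toNat + 1 := by omega
        rw [hseg, altN_step, hi1]
        simp

-- ===== VERDICT (by name: the statement is the Claim_ definition above) =====
theorem shortn_spec : Claim_equal_shortn := by
  intro n _
  unfold Spec_shortn shortn
  rw [alt_eq_altN]
  have h := loop_inv n n.length 0 (PySem.List.len n - 1) [] (by omega)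
    (by simp only [PySem.List.len_eq]; omega) (by simp only [PySem.List.len_eq]; omega)
  rw [h]
  simp
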